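-- pv_equiv track=rewrite | github.com/henrylin777/stock-price-prediction | utils.py | trend2action
-- ===== SOURCE A (Python) =====
-- def trend2action(trend_list: list) -> list:
--     result = []
--     slot = 0
--
--     for index in range(0, len(trend_list)-1):
--         curr = trend_list[index]
--
--         if curr == -2:
--             if slot == 0:
--                 result.append(-1)
--                 slot = -1
--             elif slot == 1:
--                 result.append(-1)
--                 slot = 0
--             else:
--                 result.append(0)
--
--         elif curr == -1:
--             if slot == 0:
--                 result.append(1)
--                 slot = 1
--             elif slot == 1:
--                 result.append(0)
--             else:
--                 result.append(1)
--                 slot = 0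
--
--         elif curr == 0:
--             result.append(0)
--             slot = 0
--
--         elif curr == 1:
--             if slot == 0:
--                 result.append(0)
--             elif slot == 1:
--                 result.append(-1)
--                 slot = 0
--             else:
--                 result.append(0)
--
--
--         elif curr == 2:
--             if slot == 0:
--                 result.append(1)
--                 slot = 1
--             elif slot == 1:
--                 result.append(0)
--             else:
--                 result.append(0)
--
--
--
--     return result
-- ===== SOURCE B (Python) =====
-- def _next(slot, curr):
--     if curr == -2:
--         return max(-1, slot - 1)
--     if curr == -1:
--         return min(1, slot + 1)
--     if curr == 0:
--         return 0
--     if curr == 1: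
--         return min(slot, 0)
--     if curr == 2:
--         return 1 if slot == 0 else slot
--     return slot
--
--
-- def trend2action(trend_list: list) -> list:
--     # stage 1: the slot held before/after each step, by arithmetic clamps
--     slots = [0]
--     for curr in trend_list[:-1]:
--         slots.append(_next(slots[-1], curr))
--     # stage 2: each action is the slot difference (0 when curr == 0);
--     # unrecognized values moved no slot and emitted nothing
--     return [0 if c == 0 else s1 - s0
--             for s0, s1, c in zip(slots, slots[1:], trend_list)
--             if -2 <= c <= 2]
-- ===== Notes on version B (the rewrite author's own statement) =====
-- stated objective: alternative
-- what changed: Replaced A's single-pass branch-cascade state machine by two staged passes with an arithmetic characterization: a scan computing the slot sequence via clamp formulas (max/min), then a comprehension emitting each action as the slot difference s1-s0 (0 when curr==0), filtering out unrecognized trend values.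
import Mathlib
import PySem

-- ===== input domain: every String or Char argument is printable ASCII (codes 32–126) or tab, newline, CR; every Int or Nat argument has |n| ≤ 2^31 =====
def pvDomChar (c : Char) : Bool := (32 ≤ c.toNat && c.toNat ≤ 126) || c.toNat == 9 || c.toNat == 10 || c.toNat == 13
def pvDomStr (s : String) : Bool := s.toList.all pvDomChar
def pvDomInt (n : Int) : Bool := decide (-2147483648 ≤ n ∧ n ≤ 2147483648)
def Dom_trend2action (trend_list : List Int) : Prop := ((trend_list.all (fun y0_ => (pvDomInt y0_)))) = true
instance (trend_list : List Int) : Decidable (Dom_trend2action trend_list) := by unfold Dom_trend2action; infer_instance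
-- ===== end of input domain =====

-- B replaces A's one-pass branch-cascade state machine by two staged passes built on an
-- arithmetic characterization: slots evolve by clamp formulas, actions are slot differences.

-- ===== PORT A =====
-- one iteration of A's loop body: state = (result, slot)
def pvStepA (st : List Int × Int) (curr : Int) : List Int × Int :=
  let result := st.1
  let slot := st.2
  if curr = -2 then
    if slot = 0 then (result ++ [-1], -1)
    else if slot = 1 then (result ++ [-1], 0)
    else (result ++ [0], slot)
  else if curr = -1 then
    if slot = 0 then (result ++ [1], 1)
    else if slot = 1 then (result ++ [0], slot)
    else (result ++ [1], 0)
  else if curr = 0 then (result ++ [0], 0)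
  else if curr = 1 then
    if slot = 0 then (result ++ [0], slot)
    else if slot = 1 then (result ++ [-1], 0)
    else (result ++ [0], slot)
  else if curr = 2 then
    if slot = 0 then (result ++ [1], 1)
    else if slot = 1 then (result ++ [0], slot)
    else (result ++ [0], slot)
  else st

def trend2action (trend_list : List Int) : List Int :=
  ((PySem.List.pyRange 0 ((trend_list.length : Int) - 1) 1).foldl
    (fun st index => pvStepA st (PySem.List.pyGetD trend_list index 0)) ([], 0)).1

-- ===== PORT B =====
-- Source B's _next: arithmetic clamp formulas for the slot evolution
def pvNext (slot curr : Int) : Int :=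
  if curr = -2 then max (-1) (slot - 1)
  else if curr = -1 then min 1 (slot + 1)
  else if curr = 0 then 0
  else if curr = 1 then min slot 0
  else if curr = 2 then (if slot = 0 then 1 else slot)
  else slot

-- stage 1 of Source B: the successive slots appended after the initial 0
def pvScan (slot : Int) : List Int → List Int
  | [] => []
  | c :: cs => pvNext slot c :: pvScan (pvNext slot c) cs

def trend2action_alt (trend_list : List Int) : List Int :=
  let slots : List Int := 0 :: pvScan 0 trend_list.dropLast
  -- stage 2 of Source B: the comprehension over zip(slots, slots[1:], trend_list)
  ((slots.zip slots.tail).zip trend_list).filterMap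
    (fun p => if -2 ≤ p.2 ∧ p.2 ≤ 2 then some (if p.2 = 0 then 0 else p.1.2 - p.1.1) else none)

-- ===== PRECONDITION & SPEC =====
def Spec_trend2action (trend_list : List Int) (out : List Int) : Prop := out = trend2action_alt trend_list
instance (trend_list : List Int) (out : List Int) : Decidable (Spec_trend2action trend_list out) := by unfold Spec_trend2action; infer_instance

-- ===== CLAIM (what is proved, stated in full; the proofs are below) =====
def Claim_equal_trend2action : Prop := ∀ (trend_list : List Int), Dom_trend2action trend_list → Spec_trend2action trend_list (trend2action trend_list)

-- ===== LEMMAS AND PROOFS =====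

-- the action A emits at one step (as emitted by B's comprehension)
def pvEmit (slot c : Int) : List Int :=
  if -2 ≤ c ∧ c ≤ 2 then [if c = 0 then 0 else pvNext slot c - slot] else []

-- the whole action list, step by step
def pvActs (slot : Int) : List Int → List Int
  | [] => []
  | c :: cs => pvEmit slot c ++ pvActs (pvNext slot c) cs

-- one step of A equals "emit the slot difference, move to the clamped slot", for reachable slots
theorem pvStepA_eq (res : List Int) (slot c : Int) (h : slot = -1 ∨ slot = 0 ∨ slot = 1) :
    pvStepA (res, slot) c = (res ++ pvEmit slot c, pvNext slot c) ∧
      (pvNext slot c = -1 ∨ pvNext slot c = 0 ∨ pvNext slot c = 1) := by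
  rcases h with h | h | h <;> subst h <;>
    by_cases h2 : c = -2 <;> by_cases h1 : c = -1 <;> by_cases h0 : c = 0 <;>
      by_cases hp1 : c = 1 <;> by_cases hp2 : c = 2 <;>
    first
      | omega
      | (first | subst h2 | subst h1 | subst h0 | subst hp1 | subst hp2
         exact ⟨rfl, by norm_num [pvNext]⟩)
      | (refine ⟨?_, by simp [pvNext, h2, h1, h0, hp1, hp2]⟩
         have hc : ¬ (-2 ≤ c ∧ c ≤ 2) := by omega
         simp [pvStepA, pvEmit, pvNext, h2, h1, h0, hp1, hp2, hc])

-- A's fold produces exactly the step-by-step action list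
theorem pvFoldA (xs : List Int) (res : List Int) (slot : Int)
    (h : slot = -1 ∨ slot = 0 ∨ slot = 1) :
    (xs.foldl pvStepA (res, slot)).1 = res ++ pvActs slot xs := by
  induction xs generalizing res slot with
  | nil => simp [pvActs]
  | cons c cs ih =>
    obtain ⟨heq, hinv⟩ := pvStepA_eq res slot c h
    simp only [List.foldl_cons, heq, pvActs, ← List.append_assoc]
    exact ih _ _ hinv

-- B's zipped comprehension over the scan produces the same step-by-step list
theorem pvZipB (cs : List Int) (slot : Int) (ds : List Int) :
    (((slot :: pvScan slot cs).zip (pvScan slot cs)).zip (cs ++ ds)).filterMap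
        (fun p => if -2 ≤ p.2 ∧ p.2 ≤ 2 then some (if p.2 = 0 then 0 else p.1.2 - p.1.1) else none)
      = pvActs slot cs := by
  induction cs generalizing slot with
  | nil => simp [pvScan, pvActs, List.zip]
  | cons c cs ih =>
    simp only [pvScan, pvActs, List.cons_append, List.zip_cons_cons, List.filterMap_cons]
    by_cases hc : -2 ≤ c ∧ c ≤ 2 <;> simp [pvEmit, hc, ih]

-- ===== VERDICT (by name: the statement is the Claim_ definition above) =====
theorem trend2action_spec : Claim_equal_trend2action := by
  intro xs _
  unfold Spec_trend2action trend2action trend2action_alt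
  rcases hxs : xs with _ | ⟨x, rest⟩
  · rfl
  · have hlen : (((x :: rest) : List Int).length : Int) - 1 = (((x :: rest).dropLast).length : Int) := by
      simp
    rw [hlen]
    rw [PySem.List.foldl_congr_mem _ _
        (fun st i => pvStepA st (PySem.List.pyGetD ((x :: rest).dropLast) i 0)) _ ?_]
    · rw [PySem.List.foldl_pyRange_zero_pyGetD' ((x :: rest).dropLast) 0 pvStepA ([], 0)]
      rw [pvFoldA ((x :: rest).dropLast) [] 0 (Or.inr (Or.inl rfl))]
      have hsplit : (x :: rest) = (x :: rest).dropLast ++ [(x :: rest).getLast (by simp)] :=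
        (List.dropLast_append_getLast (by simp)).symm
      conv_rhs => rw [hsplit]
      simp only [List.dropLast_concat, List.tail_cons]
      rw [pvZipB]
      simp
    · intro acc i hi
      rw [PySem.List.mem_pyRange_one] at hi
      have hi2 : i < (((x :: rest) : List Int).length : Int) := by
        have := hi.2; simp at this ⊢; omega
      congr 1
      rw [PySem.List.pyGetD_eq_getElem _ 0 hi.1 hi2,
          PySem.List.pyGetD_eq_getElem _ 0 hi.1 hi.2]
      simp [List.getElem_dropLast]
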